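-- pv_equiv track=rewrite | github.com/ghkdgus29/algorithm | 이분 탐색/1981.py | bfs
-- ===== SOURCE A (Python) =====
-- import collections
--
-- dx = [1, -1, 0, 0]
--
-- dy = [0, 0, 1, -1]
--
-- def bfs(a, minimum, maximum):                       # 시작지점부터 도착지점까지의 경로값들이 최소값과 최대값내에 존재하는지 판별
--     if minimum > a[0][0] or maximum < a[0][0]:
--         return False
--     n = len(a)
--     visit = [[False] * n for _ in range(n)]
--     queue = collections.deque()
--     queue.append((0, 0))
--     visit[0][0] = True
--     while queue:
--         x, y = queue.popleft()
--         for i in range(4):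
--             nx = x + dx[i]
--             ny = y + dy[i]
--             if 0 <= nx < n and 0 <= ny < n:
--                 if not visit[ny][nx] and minimum <= a[ny][nx] <= maximum:   # 다음 노드를 방문하지 않았고, 다음 노드 값이 최소값과 최대값사이에 있다면 이동
--                     queue.append((nx, ny))
--                     visit[ny][nx] = True
--
--     return visit[-1][-1]            # 만약 도착지점을 도착하지 못했다면, False 가 반환된다.
-- ===== SOURCE B (Python) =====
-- def bfs(a, minimum, maximum):
--     n = len(a)
--     if not (minimum <= a[0][0] <= maximum):
--         return False
--     reach = {(0, 0)}
--     while True: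
--         added = [(x, y)
--                  for y in range(n) for x in range(n)
--                  if (x, y) not in reach
--                  and minimum <= a[y][x] <= maximum
--                  and ((x - 1, y) in reach or (x + 1, y) in reach
--                       or (x, y - 1) in reach or (x, y + 1) in reach)]
--         if not added:
--             return (n - 1, n - 1) in reach
--         reach.update(added)
-- ===== Notes on version B (the rewrite author's own statement) =====
-- stated objective: alternative
-- what changed: Replaces the BFS queue/frontier with a whole-grid fixed-point saturation: repeatedly scan all cells and add every in-range cell adjacent to the already-reached set until a scan adds nothing, then test membership of the far corner.
-- outside the precondition, e.g. on bfs([[1, 2], [3]], 1, 1): A returns False, B raises IndexError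
import Mathlib
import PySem

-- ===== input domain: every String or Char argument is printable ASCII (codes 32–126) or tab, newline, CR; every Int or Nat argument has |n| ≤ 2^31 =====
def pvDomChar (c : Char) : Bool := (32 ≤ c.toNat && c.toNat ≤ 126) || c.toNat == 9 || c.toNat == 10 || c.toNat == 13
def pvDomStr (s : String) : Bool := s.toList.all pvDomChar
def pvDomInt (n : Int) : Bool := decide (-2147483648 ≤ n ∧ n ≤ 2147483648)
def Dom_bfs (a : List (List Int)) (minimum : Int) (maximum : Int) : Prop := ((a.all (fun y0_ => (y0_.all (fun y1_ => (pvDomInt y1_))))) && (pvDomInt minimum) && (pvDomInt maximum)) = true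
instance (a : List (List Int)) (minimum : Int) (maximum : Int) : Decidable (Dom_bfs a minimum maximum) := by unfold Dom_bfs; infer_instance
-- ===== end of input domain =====

-- B replaces the BFS queue with a whole-grid fixed-point saturation (no queue); same return value on Pre_.

-- a[y][x] — shared transliteration of the grid access both Pythons write literally
-- (exact for the in-bounds nonnegative indices both use under Pre_)
def aval (a : List (List Int)) (x y : Int) : Int :=
  PySem.List.pyGetD (PySem.List.pyGetD a y []) x 0

-- ===== PORT A =====
def pvDxs : List Int := [1, -1, 0, 0]
def pvDys : List Int := [0, 0, 1, -1]

-- visit[y][x] (indices are in bounds and nonnegative wherever the ports read/write)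
def vget (visit : List (List Bool)) (x y : Int) : Bool :=
  (visit.getD y.toNat []).getD x.toNat false

-- visit[y][x] = True
def vset (visit : List (List Bool)) (x y : Int) : List (List Bool) :=
  visit.set y.toNat ((visit.getD y.toNat []).set x.toNat true)

-- body of "for i in range(4)" for one direction d
-- body of "for i in range(4)" for one direction d (nx = c.1 + d.1, ny = c.2 + d.2 inlined)
def pvTry (a : List (List Int)) (minimum maximum : Int) (n : Nat) (c : Int × Int)
    (st : List (List Bool) × List (Int × Int)) (d : Int × Int) :
    List (List Bool) × List (Int × Int) :=
  if 0 ≤ c.1 + d.1 ∧ c.1 + d.1 < (n : Int) ∧ 0 ≤ c.2 + d.2 ∧ c.2 + d.2 < (n : Int) then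
    if vget st.1 (c.1 + d.1) (c.2 + d.2) = false
        ∧ minimum ≤ aval a (c.1 + d.1) (c.2 + d.2) ∧ aval a (c.1 + d.1) (c.2 + d.2) ≤ maximum then
      (vset st.1 (c.1 + d.1) (c.2 + d.2), st.2 ++ [(c.1 + d.1, c.2 + d.2)])
    else st
  else st

-- "while queue:" — fuel n*n is a totality guard only (the queue provably empties first)
def bfsLoop (a : List (List Int)) (minimum maximum : Int) (n : Nat) :
    Nat → List (List Bool) → List (Int × Int) → List (List Bool)
  | 0, visit, _ => visit
  | fuel + 1, visit, queue =>
    match queue with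
    | [] => visit
    | c :: rest =>
      let st := (pvDxs.zip pvDys).foldl (fun st d => pvTry a minimum maximum n c st d) (visit, rest)
      bfsLoop a minimum maximum n fuel st.1 st.2

def bfs (a : List (List Int)) (minimum : Int) (maximum : Int) : Bool :=
  let a00 := PySem.List.pyGetD (PySem.List.pyGetD a 0 []) 0 0
  if minimum > a00 ∨ maximum < a00 then false
  else
    let n := a.length
    let visit0 : List (List Bool) := List.replicate n (List.replicate n false)
    let visit1 := vset visit0 0 0
    let visit := bfsLoop a minimum maximum n (n * n) visit1 [(0, 0)]
    PySem.List.pyGetD (PySem.List.pyGetD visit (-1) []) (-1) false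

-- ===== PORT B =====
-- the "added" list comprehension of B
def addedFn (a : List (List Int)) (minimum maximum : Int) (n : Nat)
    (reach : PySem.Set (Int × Int)) : List (Int × Int) :=
  (List.range n).flatMap fun (y : Nat) =>
    (List.range n).filterMap fun (x : Nat) =>
      if ¬ PySem.Set.contains reach ((x : Int), (y : Int)) = true
          ∧ minimum ≤ aval a (x : Int) (y : Int) ∧ aval a (x : Int) (y : Int) ≤ maximum
          ∧ (PySem.Set.contains reach ((x : Int) - 1, (y : Int)) = true
             ∨ PySem.Set.contains reach ((x : Int) + 1, (y : Int)) = true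
             ∨ PySem.Set.contains reach ((x : Int), (y : Int) - 1) = true
             ∨ PySem.Set.contains reach ((x : Int), (y : Int) + 1) = true)
      then some ((x : Int), (y : Int)) else none

-- "while True:" — fuel n*n is a totality guard only (each productive pass grows reach)
def satLoop (a : List (List Int)) (minimum maximum : Int) (n : Nat) :
    Nat → PySem.Set (Int × Int) → PySem.Set (Int × Int)
  | 0, reach => reach
  | fuel + 1, reach =>
    let added := addedFn a minimum maximum n reach
    if added = [] then reach
    else satLoop a minimum maximum n fuel (PySem.Set.update reach added)

def bfs_alt (a : List (List Int)) (minimum : Int) (maximum : Int) : Bool :=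
  let n := a.length
  let a00 := PySem.List.pyGetD (PySem.List.pyGetD a 0 []) 0 0
  if ¬ (minimum ≤ a00 ∧ a00 ≤ maximum) then false
  else
    let reach := satLoop a minimum maximum n (n * n) (PySem.Set.ofList [((0 : Int), (0 : Int))])
    PySem.Set.contains reach ((n : Int) - 1, (n : Int) - 1)

-- ===== PRECONDITION & SPEC =====
-- Pre_ excludes the empty grid, a grid with an empty first row (a[0][0] raises in both), and —
-- only when the start value lies within [minimum, maximum] — jagged grids with a row shorter than
-- len(a): there A raises IndexError unless its BFS happens not to probe the short row (an accident
-- of probe order), while B scans every cell and raises.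
def Pre_bfs (a : List (List Int)) (minimum : Int) (maximum : Int) : Prop :=
  a ≠ [] ∧ a.getD 0 [] ≠ [] ∧
  (minimum > (a.getD 0 []).getD 0 0 ∨ maximum < (a.getD 0 []).getD 0 0 ∨
    ∀ row ∈ a, a.length ≤ row.length)
instance (a : List (List Int)) (minimum : Int) (maximum : Int) : Decidable (Pre_bfs a minimum maximum) := by
  unfold Pre_bfs; infer_instance

def pvWitness_bfs : List (List Int) × Int × Int := ([[1, 2], [3, 4]], 1, 4)

def Spec_bfs (a : List (List Int)) (minimum : Int) (maximum : Int) (out : Bool) : Prop := out = bfs_alt a minimum maximum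
instance (a : List (List Int)) (minimum : Int) (maximum : Int) (out : Bool) : Decidable (Spec_bfs a minimum maximum out) := by unfold Spec_bfs; infer_instance

-- ===== CLAIM (what is proved, stated in full; the proofs are below) =====
def Claim_equal_bfs : Prop := ∀ (a : List (List Int)) (minimum : Int) (maximum : Int), Dom_bfs a minimum maximum → Pre_bfs a minimum maximum → Spec_bfs a minimum maximum (bfs a minimum maximum)

-- ===== LEMMAS AND PROOFS =====

-- in-bounds cell
def inB (n : Nat) (p : Int × Int) : Prop :=
  0 ≤ p.1 ∧ p.1 < (n : Int) ∧ 0 ≤ p.2 ∧ p.2 < (n : Int)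

-- cell admissible for a move (in bounds and value within [minimum, maximum])
def good (a : List (List Int)) (minimum maximum : Int) (n : Nat) (p : Int × Int) : Prop :=
  inB n p ∧ minimum ≤ aval a p.1 p.2 ∧ aval a p.1 p.2 ≤ maximum

def nbr (c d : Int × Int) : Prop :=
  (d.1 = c.1 + 1 ∧ d.2 = c.2) ∨ (d.1 = c.1 - 1 ∧ d.2 = c.2) ∨
  (d.1 = c.1 ∧ d.2 = c.2 + 1) ∨ (d.1 = c.1 ∧ d.2 = c.2 - 1)

def step (a : List (List Int)) (minimum maximum : Int) (n : Nat) (c d : Int × Int) : Prop :=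
  nbr c d ∧ good a minimum maximum n d

def Reach (a : List (List Int)) (minimum maximum : Int) (n : Nat) (p : Int × Int) : Prop :=
  Relation.ReflTransGen (step a minimum maximum n) (0, 0) p

-- grid shape
def shapeG (n : Nat) (v : List (List Bool)) : Prop :=
  v.length = n ∧ ∀ i < n, (v.getD i []).length = n

-- number of visited cells
def tc (v : List (List Bool)) : Nat := (v.map (fun r => r.countP (fun b => b))).sum


-- ---------- generic list lemmas ----------

theorem getD_set_eq_ite {α : Type} (l : List α) (i j : Nat) (x d : α) :
    (l.set i x).getD j d = if i = j ∧ j < l.length then x else l.getD j d := by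
  simp only [List.getD_eq_getElem?_getD, List.getElem?_set]
  split_ifs <;> simp_all <;> omega

theorem getD_set_self {α : Type} (l : List α) (i : Nat) (x d : α) (h : i < l.length) :
    (l.set i x).getD i d = x := by
  rw [getD_set_eq_ite]; simp [h]

theorem getD_set_ne {α : Type} (l : List α) (i j : Nat) (x d : α) (h : i ≠ j) :
    (l.set i x).getD j d = l.getD j d := by
  rw [getD_set_eq_ite]; simp [h]

theorem countP_set_true : ∀ (r : List Bool) (j : Nat), j < r.length → r.getD j false = false →
    (r.set j true).countP (fun b => b) = r.countP (fun b => b) + 1 := by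
  intro r
  induction r with
  | nil => intro j h; simp at h
  | cons b t ih =>
    intro j hj hg
    cases j with
    | zero => simp_all
    | succ k =>
      simp only [List.set_cons_succ, List.countP_cons]
      rw [ih k (by simpa using hj) (by simpa using hg)]
      omega

-- ---------- vget / vset / shape / tc lemmas ----------

theorem shapeG_replicate (n : Nat) : shapeG n (List.replicate n (List.replicate n false)) := by
  refine ⟨by simp, ?_⟩
  intro i hi
  simp only [List.getD_eq_getElem?_getD, List.getElem?_replicate]
  simp [hi]

theorem vget_replicate (n : Nat) (x y : Int) :
    vget (List.replicate n (List.replicate n false)) x y = false := by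
  unfold vget
  simp only [List.getD_eq_getElem?_getD, List.getElem?_replicate]
  split_ifs with h
  · simp only [Option.getD_some]
    rw [List.getElem?_replicate]
    split <;> simp
  · simp

theorem gget_gset (v : List (List Bool)) (i j i' j' : Nat) :
    ((v.set i ((v.getD i []).set j true)).getD i' []).getD j' false =
      if i = i' ∧ j = j' ∧ i < v.length ∧ j < (v.getD i []).length then true
      else (v.getD i' []).getD j' false := by
  by_cases hi : i = i'
  · subst hi
    by_cases hl : i < v.length
    · rw [getD_set_self _ _ _ _ hl, getD_set_eq_ite]
      by_cases hj : j = j'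
      · subst hj
        by_cases hbnd : j < (v.getD i []).length
        · rw [if_pos ⟨rfl, hbnd⟩, if_pos ⟨rfl, rfl, hl, hbnd⟩]
        · rw [if_neg (by tauto), if_neg (by tauto)]
      · rw [if_neg (by tauto), if_neg (by tauto)]
    · rw [List.set_eq_of_length_le (le_of_not_gt hl)]
      rw [if_neg (by tauto)]
  · rw [getD_set_ne _ _ _ _ _ hi, if_neg (by tauto)]

theorem shapeG_vset {n : Nat} {v : List (List Bool)} {x y : Int}
    (hs : shapeG n v) (hb : inB n (x, y)) : shapeG n (vset v x y) := by
  obtain ⟨h1, h2⟩ := hs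
  obtain ⟨hx0, hxn, hy0, hyn⟩ := hb
  have hyt : y.toNat < n := by omega
  refine ⟨by simp [vset, h1], ?_⟩
  intro i hi
  unfold vset
  by_cases hiy : y.toNat = i
  · subst hiy
    rw [getD_set_self _ _ _ _ (by omega), List.length_set]
    exact h2 _ hyt
  · rw [getD_set_ne _ _ _ _ _ hiy]
    exact h2 i hi

theorem vget_vset_self {n : Nat} {v : List (List Bool)} {x y : Int}
    (hs : shapeG n v) (hb : inB n (x, y)) : vget (vset v x y) x y = true := by
  obtain ⟨h1, h2⟩ := hs
  obtain ⟨hx0, hxn, hy0, hyn⟩ := hb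
  have hyt : y.toNat < n := by omega
  unfold vget vset
  rw [gget_gset, if_pos]
  exact ⟨rfl, rfl, by omega, by rw [h2 _ hyt]; omega⟩

theorem vget_vset_ne {n : Nat} {v : List (List Bool)} {x y x' y' : Int}
    (hb : inB n (x, y)) (hb' : inB n (x', y')) (hne : (x', y') ≠ (x, y)) :
    vget (vset v x y) x' y' = vget v x' y' := by
  obtain ⟨hx0, hxn, hy0, hyn⟩ := hb
  obtain ⟨hx0', hxn', hy0', hyn'⟩ := hb'
  unfold vget vset
  rw [gget_gset, if_neg]
  rintro ⟨e1, e2, -, -⟩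
  exact hne (by apply Prod.ext <;> simp_all <;> omega)

theorem vget_vset_mono {v : List (List Bool)} {x y x' y' : Int}
    (h : vget v x' y' = true) : vget (vset v x y) x' y' = true := by
  unfold vget vset at *
  rw [gget_gset]
  split_ifs with hc
  · rfl
  · exact h

theorem tc_replicate (n : Nat) : tc (List.replicate n (List.replicate n false)) = 0 := by
  simp [tc, List.map_replicate, List.countP_eq_zero]

theorem tc_set_row : ∀ (v : List (List Bool)) (i : Nat) (r' : List Bool), i < v.length →
    r'.countP (fun b => b) = (v.getD i []).countP (fun b => b) + 1 →
    tc (v.set i r') = tc v + 1 := by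
  intro v
  induction v with
  | nil => intro i r h; simp at h
  | cons r t ih =>
    intro i r' hi hc
    cases i with
    | zero =>
      simp only [List.getD_cons_zero] at hc
      simp [tc, List.set_cons_zero, hc]
      omega
    | succ k =>
      simp only [List.getD_cons_succ] at hc
      have := ih k r' (by simpa using hi) hc
      simp only [tc, List.set_cons_succ, List.map_cons, List.sum_cons] at this ⊢
      omega

theorem tc_vset {n : Nat} {v : List (List Bool)} {x y : Int}
    (hs : shapeG n v) (hb : inB n (x, y)) (hf : vget v x y = false) :
    tc (vset v x y) = tc v + 1 := by
  obtain ⟨h1, h2⟩ := hs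
  obtain ⟨hx0, hxn, hy0, hyn⟩ := hb
  have hyt : y.toNat < n := by omega
  apply tc_set_row _ _ _ (by omega)
  apply countP_set_true _ _ (by rw [h2 _ hyt]; omega)
  exact hf

theorem tc_le_aux (m : Nat) : ∀ (v : List (List Bool)), (∀ r ∈ v, r.length ≤ m) →
    tc v ≤ v.length * m := by
  intro v
  induction v with
  | nil => simp [tc]
  | cons r t ih =>
    intro h
    simp only [tc, List.map_cons, List.sum_cons, List.length_cons]
    have h1 : r.countP (fun b => b) ≤ m :=
      le_trans List.countP_le_length (h r List.mem_cons_self)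
    have h2 := ih (fun r hr => h r (List.mem_cons_of_mem _ hr))
    simp only [tc] at h2
    calc r.countP (fun b => b) + (t.map (fun r => r.countP (fun b => b))).sum
        ≤ m + t.length * m := by omega
      _ = (t.length + 1) * m := by ring
  
theorem tc_le {n : Nat} {v : List (List Bool)} (hs : shapeG n v) : tc v ≤ n * n := by
  obtain ⟨h1, h2⟩ := hs
  have : ∀ r ∈ v, r.length ≤ n := by
    intro r hr
    obtain ⟨i, hi, hg⟩ := List.mem_iff_getElem.mp hr
    have : v.getD i [] = r := by
      rw [List.getD_eq_getElem?_getD, List.getElem?_eq_getElem hi, Option.getD_some, hg]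
    rw [← this, h2 i (by omega)]
  have := tc_le_aux n v this
  rw [h1] at this
  exact this

-- ---------- symmetric facts about nbr ----------

theorem nbr_fromdiff {c p : Int × Int} (h : nbr c p) :
    c = (p.1 - 1, p.2) ∨ c = (p.1 + 1, p.2) ∨ c = (p.1, p.2 - 1) ∨ c = (p.1, p.2 + 1) := by
  rcases h with ⟨h1, h2⟩ | ⟨h1, h2⟩ | ⟨h1, h2⟩ | ⟨h1, h2⟩
  · left; apply Prod.ext <;> simp <;> omega
  · right; left; apply Prod.ext <;> simp <;> omega
  · right; right; left; apply Prod.ext <;> simp <;> omega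
  · right; right; right; apply Prod.ext <;> simp <;> omega

-- ---------- B-side: saturation lemmas ----------

theorem mem_addedFn {a : List (List Int)} {mn mx : Int} {n : Nat}
    {S : PySem.Set (Int × Int)} {p : Int × Int} :
    p ∈ addedFn a mn mx n S ↔
      p ∉ S ∧ good a mn mx n p ∧ ∃ c ∈ S, nbr c p := by
  unfold addedFn
  rw [List.mem_flatMap]
  constructor
  · rintro ⟨y, hy, hmem⟩
    rw [List.mem_filterMap] at hmem
    obtain ⟨x, hx, hcond⟩ := hmem
    rw [List.mem_range] at hy hx
    split_ifs at hcond with hc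
    · obtain ⟨hnm, hv1, hv2, hnb⟩ := hc
      injection hcond with hcond
      subst hcond
      rw [PySem.Set.contains_iff] at hnm
      refine ⟨hnm, ⟨⟨by simp, by simpa using Int.ofNat_lt.mpr hx, by simp, by simpa using Int.ofNat_lt.mpr hy⟩, hv1, hv2⟩, ?_⟩
      rcases hnb with h | h | h | h <;> rw [PySem.Set.contains_iff] at h
      · exact ⟨_, h, Or.inl ⟨by simp, rfl⟩⟩
      · exact ⟨_, h, Or.inr (Or.inl ⟨by simp, rfl⟩)⟩
      · exact ⟨_, h, Or.inr (Or.inr (Or.inl ⟨rfl, by simp⟩))⟩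
      · exact ⟨_, h, Or.inr (Or.inr (Or.inr ⟨rfl, by simp⟩))⟩
  · rintro ⟨hnm, ⟨⟨hx0, hxn, hy0, hyn⟩, hv1, hv2⟩, c, hc, hnb⟩
    have hc1 : (p.1.toNat : Int) = p.1 := by omega
    have hc2 : (p.2.toNat : Int) = p.2 := by omega
    refine ⟨p.2.toNat, List.mem_range.mpr (by omega), ?_⟩
    rw [List.mem_filterMap]
    refine ⟨p.1.toNat, List.mem_range.mpr (by omega), ?_⟩
    rw [if_pos]
    · rw [hc1, hc2]
    · rw [hc1, hc2]
      refine ⟨?_, hv1, hv2, ?_⟩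
      · rw [PySem.Set.contains_iff]
        intro hmem
        exact hnm (by simpa using hmem)
      · rcases nbr_fromdiff hnb with h | h | h | h
        · exact Or.inl (by rw [PySem.Set.contains_iff, ← h]; exact hc)
        · exact Or.inr (Or.inl (by rw [PySem.Set.contains_iff, ← h]; exact hc))
        · exact Or.inr (Or.inr (Or.inl (by rw [PySem.Set.contains_iff, ← h]; exact hc)))
        · exact Or.inr (Or.inr (Or.inr (by rw [PySem.Set.contains_iff, ← h]; exact hc)))

theorem mem_update_iff {S : PySem.Set (Int × Int)} {xs : List (Int × Int)} {p : Int × Int} :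
    p ∈ PySem.Set.update S xs ↔ p ∈ S ∨ p ∈ xs := by
  rw [PySem.Set.update_eq_append_filter, List.mem_append]
  constructor
  · rintro (h | h)
    · exact Or.inl h
    · exact Or.inr ((PySem.Set.mem_ofList xs p).mp (List.mem_of_mem_filter h))
  · rintro (h | h)
    · exact Or.inl h
    · by_cases hS : p ∈ S
      · exact Or.inl hS
      · refine Or.inr (List.mem_filter.mpr ⟨(PySem.Set.mem_ofList xs p).mpr h, ?_⟩)
        simp only [Bool.not_eq_true']
        rw [← Bool.not_eq_true, PySem.Set.contains_iff]
        exact hS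

theorem sat_mono (a : List (List Int)) (mn mx : Int) (n : Nat) :
    ∀ (fuel : Nat) (S : PySem.Set (Int × Int)) (p : Int × Int), p ∈ S →
      p ∈ satLoop a mn mx n fuel S := by
  intro fuel
  induction fuel with
  | zero => intro S p h; exact h
  | succ k ih =>
    intro S p h
    simp only [satLoop]
    split_ifs with hadd
    · exact h
    · exact ih _ p (mem_update_iff.mpr (Or.inl h))

theorem sat_sound (a : List (List Int)) (mn mx : Int) (n : Nat) :
    ∀ (fuel : Nat) (S : PySem.Set (Int × Int)),
      (∀ p ∈ S, Reach a mn mx n p) →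
      ∀ p ∈ satLoop a mn mx n fuel S, Reach a mn mx n p := by
  intro fuel
  induction fuel with
  | zero => intro S h p hp; exact h p hp
  | succ k ih =>
    intro S h p hp
    simp only [satLoop] at hp
    split_ifs at hp with hadd
    · exact h p hp
    · refine ih _ ?_ p hp
      intro q hq
      rcases mem_update_iff.mp hq with hq | hq
      · exact h q hq
      · obtain ⟨_, hgood, c, hc, hnb⟩ := mem_addedFn.mp hq
        exact Relation.ReflTransGen.tail (h c hc) ⟨hnb, hgood⟩

theorem nodup_len_le {n : Nat} {S : PySem.Set (Int × Int)}
    (hnd : S.Nodup) (hb : ∀ p ∈ S, inB n p) : S.length ≤ n * n := by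
  rw [← List.toFinset_card_of_nodup hnd]
  have hsub : S.toFinset ⊆ (Finset.Ico (0 : Int) n) ×ˢ (Finset.Ico (0 : Int) n) := by
    intro p hp
    rw [List.mem_toFinset] at hp
    obtain ⟨h1, h2, h3, h4⟩ := hb p hp
    simp only [Finset.mem_product, Finset.mem_Ico]
    exact ⟨⟨h1, h2⟩, ⟨h3, h4⟩⟩
  calc S.toFinset.card ≤ _ := Finset.card_le_card hsub
    _ = n * n := by rw [Finset.card_product, Int.card_Ico]; simp

theorem sat_closed (a : List (List Int)) (mn mx : Int) (n : Nat) :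
    ∀ (fuel : Nat) (S : PySem.Set (Int × Int)),
      S.Nodup → (∀ p ∈ S, inB n p) → n * n < fuel + S.length →
      addedFn a mn mx n (satLoop a mn mx n fuel S) = [] := by
  intro fuel
  induction fuel with
  | zero =>
    intro S hnd hb hlt
    exact absurd (nodup_len_le hnd hb) (by omega)
  | succ k ih =>
    intro S hnd hb hlt
    simp only [satLoop]
    split_ifs with hadd
    · exact hadd
    · apply ih
      · exact PySem.Set.nodup_update _ _ hnd
      · intro p hp
        rcases mem_update_iff.mp hp with hp | hp
        · exact hb p hp
        · exact (mem_addedFn.mp hp).2.1.1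
      · obtain ⟨q, hq⟩ := List.exists_mem_of_ne_nil _ hadd
        have hqS : q ∉ S := (mem_addedFn.mp hq).1
        have : S.length + 1 ≤ (PySem.Set.update S (addedFn a mn mx n S)).length := by
          rw [PySem.Set.update_eq_append_filter, List.length_append]
          have : (PySem.Set.ofList (addedFn a mn mx n S)).filter
              (fun y => !(PySem.Set.contains S y)) ≠ [] := by
            intro hemp
            have : q ∈ (PySem.Set.ofList (addedFn a mn mx n S)).filter
                (fun y => !(PySem.Set.contains S y)) := by
              refine List.mem_filter.mpr ⟨(PySem.Set.mem_ofList _ q).mpr hq, ?_⟩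
              simp only [Bool.not_eq_true']
              rw [← Bool.not_eq_true, PySem.Set.contains_iff]
              exact hqS
            rw [hemp] at this
            exact absurd this (List.not_mem_nil)
          have := List.length_pos_of_ne_nil this
          omega
        omega

theorem sat_complete {a : List (List Int)} {mn mx : Int} {n : Nat}
    {R : PySem.Set (Int × Int)}
    (hcl : addedFn a mn mx n R = [])
    (h0 : ((0 : Int), (0 : Int)) ∈ R) :
    ∀ p, Reach a mn mx n p → p ∈ R := by
  intro p hp
  induction hp with
  | refl => exact h0
  | tail _ hstep ih =>
    rename_i c d _
    by_contra hd
    have : d ∈ addedFn a mn mx n R :=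
      mem_addedFn.mpr ⟨hd, hstep.2, c, ih, hstep.1⟩
    rw [hcl] at this
    exact absurd this (List.not_mem_nil)

-- B's saturated reach set equals Reach (given n ≥ 1)
theorem satB_main (a : List (List Int)) (mn mx : Int) (n : Nat) (hn : 1 ≤ n) :
    ∀ p, inB n p →
      (p ∈ satLoop a mn mx n (n * n) (PySem.Set.ofList [((0 : Int), (0 : Int))]) ↔
        Reach a mn mx n p) := by
  have hS0 : PySem.Set.ofList [((0 : Int), (0 : Int))] = [((0 : Int), (0 : Int))] := by decide
  intro p _
  constructor
  · apply sat_sound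
    intro q hq
    rw [hS0] at hq
    simp at hq
    subst hq
    exact Relation.ReflTransGen.refl
  · intro hr
    apply sat_complete (n := n) (mn := mn) (mx := mx)
    · apply sat_closed
      · rw [hS0]; exact List.nodup_singleton _
      · intro q hq
        rw [hS0] at hq
        simp at hq
        subst hq
        have h0n : (0 : Int) < (n : Int) := by exact_mod_cast hn
        exact ⟨by simp, by simpa using h0n, by simp, by simpa using h0n⟩
      · rw [hS0]
        simp
    · apply sat_mono
      rw [hS0]
      simp
    · exact hr


-- ---------- A-side: BFS invariants ----------

def FoldInv (a : List (List Int)) (mn mx : Int) (n : Nat) (c : Int × Int)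
    (visit : List (List Bool)) (rest : List (Int × Int))
    (st : List (List Bool) × List (Int × Int)) : Prop :=
  shapeG n st.1 ∧
  (∀ x y : Int, vget visit x y = true → vget st.1 x y = true) ∧
  ∃ news : List (Int × Int),
    st.2 = rest ++ news ∧
    news.Nodup ∧
    (∀ p ∈ news, step a mn mx n c p ∧ vget st.1 p.1 p.2 = true ∧ vget visit p.1 p.2 = false) ∧
    (∀ p : Int × Int, inB n p → vget st.1 p.1 p.2 = true → vget visit p.1 p.2 = true ∨ p ∈ news) ∧
    tc st.1 = tc visit + news.length

theorem pvTry_mono {a : List (List Int)} {mn mx : Int} {n : Nat} {c : Int × Int}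
    {st : List (List Bool) × List (Int × Int)} {d : Int × Int} {x y : Int}
    (h : vget st.1 x y = true) : vget (pvTry a mn mx n c st d).1 x y = true := by
  unfold pvTry
  split_ifs with h1 h2
  · exact vget_vset_mono h
  · exact h
  · exact h

theorem pvTry_preserve (a : List (List Int)) (mn mx : Int) (n : Nat) (c : Int × Int)
    (visit : List (List Bool)) (rest : List (Int × Int))
    (st : List (List Bool) × List (Int × Int)) (d : Int × Int)
    (hd : nbr c (c.1 + d.1, c.2 + d.2))
    (h : FoldInv a mn mx n c visit rest st) :
    FoldInv a mn mx n c visit rest (pvTry a mn mx n c st d) ∧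
      (good a mn mx n (c.1 + d.1, c.2 + d.2) →
        vget (pvTry a mn mx n c st d).1 (c.1 + d.1) (c.2 + d.2) = true) := by
  obtain ⟨hs, hmono, news, hq, hnd, hnews, hnew, htc⟩ := h
  unfold pvTry
  split_ifs with hb hv
  · -- push case
    have hbq : inB n (c.1 + d.1, c.2 + d.2) := ⟨hb.1, hb.2.1, hb.2.2.1, hb.2.2.2⟩
    have hgood : good a mn mx n (c.1 + d.1, c.2 + d.2) := ⟨hbq, hv.2.1, hv.2.2⟩
    have hvisitf : vget visit (c.1 + d.1) (c.2 + d.2) = false := by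
      cases hvv : vget visit (c.1 + d.1) (c.2 + d.2) with
      | false => rfl
      | true => rw [hmono _ _ hvv] at hv; exact absurd hv.1 (by simp)
    refine ⟨⟨shapeG_vset hs hbq, ?_, news ++ [(c.1 + d.1, c.2 + d.2)], ?_, ?_, ?_, ?_, ?_⟩, ?_⟩
    · intro x y hx
      exact vget_vset_mono (hmono x y hx)
    · simp only [hq, List.append_assoc]
    · rw [List.nodup_append]
      refine ⟨hnd, List.nodup_singleton _, ?_⟩
      intro p hp q hq heq
      rw [List.mem_singleton] at hq
      subst hq
      have h1 := (hnews p hp).2.1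
      rw [heq] at h1
      rw [h1] at hv
      exact absurd hv.1 (by simp)
    · intro p hp
      rcases List.mem_append.mp hp with hp | hp
      · exact ⟨(hnews p hp).1, vget_vset_mono (hnews p hp).2.1, (hnews p hp).2.2⟩
      · rw [List.mem_singleton] at hp
        subst hp
        exact ⟨⟨hd, hgood⟩, vget_vset_self hs hbq, hvisitf⟩
    · intro p hpB hpv
      by_cases hpq : p = (c.1 + d.1, c.2 + d.2)
      · exact Or.inr (List.mem_append.mpr (Or.inr (by rw [hpq]; exact List.mem_singleton_self _)))
      · have hne : (p.1, p.2) ≠ (c.1 + d.1, c.2 + d.2) := by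
          intro hcon
          exact hpq (by rw [← hcon])
        rw [vget_vset_ne hbq (by exact hpB) hne] at hpv
        rcases hnew p hpB hpv with h | h
        · exact Or.inl h
        · exact Or.inr (List.mem_append.mpr (Or.inl h))
    · rw [tc_vset hs hbq hv.1, htc, List.length_append]
      simp
      omega
    · intro _
      exact vget_vset_self hs hbq
  · refine ⟨⟨hs, hmono, news, hq, hnd, hnews, hnew, htc⟩, ?_⟩
    intro hg
    cases hvv : vget st.1 (c.1 + d.1) (c.2 + d.2) with
    | false => exact absurd ⟨hvv, hg.2.1, hg.2.2⟩ hv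
    | true => rfl
  · refine ⟨⟨hs, hmono, news, hq, hnd, hnews, hnew, htc⟩, ?_⟩
    intro hg
    exact absurd ⟨hg.1.1, hg.1.2.1, hg.1.2.2.1, hg.1.2.2.2⟩ hb

theorem fold_inv (a : List (List Int)) (mn mx : Int) (n : Nat) (c : Int × Int)
    (visit : List (List Bool)) (rest : List (Int × Int)) (hs : shapeG n visit) :
    FoldInv a mn mx n c visit rest
        ((pvDxs.zip pvDys).foldl (fun st d => pvTry a mn mx n c st d) (visit, rest)) ∧
      ∀ q, step a mn mx n c q →
        vget ((pvDxs.zip pvDys).foldl (fun st d => pvTry a mn mx n c st d) (visit, rest)).1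
          q.1 q.2 = true := by
  have hzip : pvDxs.zip pvDys = [((1 : Int), (0 : Int)), (-1, 0), (0, 1), (0, -1)] := rfl
  rw [hzip]
  simp only [List.foldl_cons, List.foldl_nil]
  have h0 : FoldInv a mn mx n c visit rest (visit, rest) :=
    ⟨hs, fun _ _ h => h, [], by simp, List.nodup_nil, by simp, fun p _ h => Or.inl h, by simp⟩
  obtain ⟨f1, d1⟩ := pvTry_preserve a mn mx n c visit rest (visit, rest) (1, 0)
    (Or.inl ⟨rfl, by ring⟩) h0
  obtain ⟨f2, d2⟩ := pvTry_preserve a mn mx n c visit rest _ (-1, 0)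
    (Or.inr (Or.inl ⟨by ring, by ring⟩)) f1
  obtain ⟨f3, d3⟩ := pvTry_preserve a mn mx n c visit rest _ (0, 1)
    (Or.inr (Or.inr (Or.inl ⟨by ring, rfl⟩))) f2
  obtain ⟨f4, d4⟩ := pvTry_preserve a mn mx n c visit rest _ (0, -1)
    (Or.inr (Or.inr (Or.inr ⟨by ring, by ring⟩))) f3
  refine ⟨f4, ?_⟩
  intro q hstep
  rcases hstep.1 with h | h | h | h
  · have hq : q = (c.1 + (1 : Int), c.2 + (0 : Int)) := by
      apply Prod.ext <;> simp [h.1, h.2]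
    rw [hq]
    exact pvTry_mono (pvTry_mono (pvTry_mono (d1 (hq ▸ hstep.2))))
  · have hq : q = (c.1 + (-1 : Int), c.2 + (0 : Int)) := by
      apply Prod.ext <;> simp [h.1, h.2] <;> ring
    rw [hq]
    exact pvTry_mono (pvTry_mono (d2 (hq ▸ hstep.2)))
  · have hq : q = (c.1 + (0 : Int), c.2 + (1 : Int)) := by
      apply Prod.ext <;> simp [h.1, h.2]
    rw [hq]
    exact pvTry_mono (d3 (hq ▸ hstep.2))
  · have hq : q = (c.1 + (0 : Int), c.2 + (-1 : Int)) := by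
      apply Prod.ext <;> simp [h.1, h.2] <;> ring
    rw [hq]
    exact d4 (hq ▸ hstep.2)

def LoopInv (a : List (List Int)) (mn mx : Int) (n : Nat)
    (visit : List (List Bool)) (queue : List (Int × Int)) : Prop :=
  shapeG n visit ∧ queue.Nodup ∧
  (∀ p ∈ queue, inB n p ∧ vget visit p.1 p.2 = true) ∧
  (∀ p : Int × Int, inB n p → vget visit p.1 p.2 = true → Reach a mn mx n p) ∧
  (∀ p q : Int × Int, inB n p → vget visit p.1 p.2 = true → p ∉ queue →
    step a mn mx n p q → vget visit q.1 q.2 = true)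

theorem loop_main (a : List (List Int)) (mn mx : Int) (n : Nat) :
    ∀ (fuel : Nat) (visit : List (List Bool)) (queue : List (Int × Int)),
    LoopInv a mn mx n visit queue →
    queue.length + (n * n - tc visit) ≤ fuel →
    shapeG n (bfsLoop a mn mx n fuel visit queue) ∧
    (∀ x y : Int, vget visit x y = true → vget (bfsLoop a mn mx n fuel visit queue) x y = true) ∧
    (∀ p : Int × Int, inB n p → vget (bfsLoop a mn mx n fuel visit queue) p.1 p.2 = true →
      Reach a mn mx n p) ∧
    (∀ p q : Int × Int, inB n p → vget (bfsLoop a mn mx n fuel visit queue) p.1 p.2 = true →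
      step a mn mx n p q → vget (bfsLoop a mn mx n fuel visit queue) q.1 q.2 = true) := by
  intro fuel
  induction fuel with
  | zero =>
    intro visit queue hinv hb
    obtain ⟨hs, hndq, hqmem, hsound, hclosed⟩ := hinv
    have hq0 : queue = [] := List.eq_nil_of_length_eq_zero (by omega)
    subst hq0
    exact ⟨hs, fun _ _ h => h, hsound,
      fun p q hpB hpv hstep => hclosed p q hpB hpv (List.not_mem_nil) hstep⟩
  | succ k ih =>
    intro visit queue hinv hb
    obtain ⟨hs, hndq, hqmem, hsound, hclosed⟩ := hinv
    match queue with
    | [] =>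
      simp only [bfsLoop]
      exact ⟨hs, fun _ _ h => h, hsound,
        fun p q hpB hpv hstep => hclosed p q hpB hpv (List.not_mem_nil) hstep⟩
    | c :: rest =>
      simp only [bfsLoop]
      obtain ⟨hcrest, hndrest⟩ := List.nodup_cons.mp hndq
      obtain ⟨hcB, hcv⟩ := hqmem c List.mem_cons_self
      obtain ⟨finv, fdone⟩ := fold_inv a mn mx n c visit rest hs
      set st := (pvDxs.zip pvDys).foldl (fun st d => pvTry a mn mx n c st d) (visit, rest)
        with hst
      obtain ⟨hs', hmono', news, hq2, hnd2, hnews, hnew, htc⟩ := finv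
      have hrest_sub : ∀ p ∈ rest, p ∈ st.2 := by
        intro p hp
        rw [hq2]
        exact List.mem_append.mpr (Or.inl hp)
      have hnews_sub : ∀ p ∈ news, p ∈ st.2 := by
        intro p hp
        rw [hq2]
        exact List.mem_append.mpr (Or.inr hp)
      have hinv' : LoopInv a mn mx n st.1 st.2 := by
        refine ⟨hs', ?_, ?_, ?_, ?_⟩
        · rw [hq2, List.nodup_append]
          refine ⟨hndrest, hnd2, ?_⟩
          intro p hp q hqn heq
          have h1 := (hqmem p (List.mem_cons_of_mem _ hp)).2
          have h2 := (hnews q hqn).2.2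
          rw [heq] at h1
          rw [h1] at h2
          simp at h2
        · intro p hp
          rw [hq2] at hp
          rcases List.mem_append.mp hp with hp | hp
          · exact ⟨(hqmem p (List.mem_cons_of_mem _ hp)).1,
              hmono' _ _ (hqmem p (List.mem_cons_of_mem _ hp)).2⟩
          · exact ⟨(hnews p hp).1.2.1, (hnews p hp).2.1⟩
        · intro p hpB hpv
          rcases hnew p hpB hpv with h | h
          · exact hsound p hpB h
          · exact Relation.ReflTransGen.tail (hsound c hcB hcv) (hnews p h).1
        · intro p q hpB hpv hpq hstep
          rcases hnew p hpB hpv with h | h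
          · by_cases hpc : p = c
            · subst hpc
              exact fdone q hstep
            · have hpnot : p ∉ (c :: rest) := by
                intro hmem
                rcases List.mem_cons.mp hmem with hmem | hmem
                · exact hpc hmem
                · exact hpq (hrest_sub p hmem)
              exact hmono' _ _ (hclosed p q hpB h hpnot hstep)
          · exact absurd (hnews_sub p h) hpq
      have htcle : tc st.1 ≤ n * n := tc_le hs'
      have hb' : st.2.length + (n * n - tc st.1) ≤ k := by
        rw [hq2, List.length_append, htc]
        simp only [List.length_cons] at hb
        omega
      obtain ⟨ih1, ih2, ih3, ih4⟩ := ih st.1 st.2 hinv' hb'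
      exact ⟨ih1, fun x y hx => ih2 x y (hmono' x y hx), ih3, ih4⟩

-- ===== VERDICT (by name: the statement is the Claim_ definition above) =====
theorem bfs_spec : Claim_equal_bfs := by
  unfold Claim_equal_bfs
  intro a mn mx hdom hpre
  unfold Spec_bfs
  obtain ⟨hne, -, -⟩ := hpre
  simp only [bfs, bfs_alt]
  by_cases hg : mn > PySem.List.pyGetD (PySem.List.pyGetD a 0 []) 0 0 ∨
      mx < PySem.List.pyGetD (PySem.List.pyGetD a 0 []) 0 0
  · rw [if_pos hg, if_pos]
    rintro ⟨h1, h2⟩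
    rcases hg with h | h <;> omega
  · rw [if_neg hg, if_neg]
    swap
    · intro hcon
      rw [not_or] at hg
      exact hcon ⟨by omega, by omega⟩
    set n := a.length with hn
    have hn1 : 1 ≤ n := by
      have := List.length_pos_of_ne_nil hne
      omega
    have h0n : (0 : Int) < (n : Int) := by exact_mod_cast hn1
    have hB0 : inB n ((0 : Int), (0 : Int)) := ⟨by simp, by simpa using h0n, by simp, by simpa using h0n⟩
    have hsrep := shapeG_replicate n
    have hshape1 : shapeG n (vset (List.replicate n (List.replicate n false)) 0 0) :=
      shapeG_vset hsrep hB0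
    have hv00 : vget (vset (List.replicate n (List.replicate n false)) 0 0) 0 0 = true :=
      vget_vset_self hsrep hB0
    have honly : ∀ p : Int × Int, inB n p →
        vget (vset (List.replicate n (List.replicate n false)) 0 0) p.1 p.2 = true →
        p = ((0 : Int), (0 : Int)) := by
      intro p hpB hpv
      by_contra hpne
      rw [vget_vset_ne hB0 hpB (by intro h; exact hpne (by rw [← h]))] at hpv
      rw [vget_replicate] at hpv
      exact absurd hpv (by simp)
    have hinv0 : LoopInv a mn mx n (vset (List.replicate n (List.replicate n false)) 0 0)
        [((0 : Int), (0 : Int))] := by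
      refine ⟨hshape1, List.nodup_singleton _, ?_, ?_, ?_⟩
      · intro p hp
        rw [List.mem_singleton] at hp
        subst hp
        exact ⟨hB0, hv00⟩
      · intro p hpB hpv
        rw [honly p hpB hpv]
        exact Relation.ReflTransGen.refl
      · intro p q hpB hpv hpq hstep
        exact absurd (by rw [honly p hpB hpv]; exact List.mem_singleton_self _) hpq
    have htc1 : tc (vset (List.replicate n (List.replicate n false)) 0 0) = 1 := by
      rw [tc_vset hsrep hB0 (vget_replicate n 0 0), tc_replicate]
    have hnn1 : 1 ≤ n * n := by
      have := Nat.mul_le_mul hn1 hn1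
      simpa using this
    have hbound : ([((0 : Int), (0 : Int))]).length +
        (n * n - tc (vset (List.replicate n (List.replicate n false)) 0 0)) ≤ n * n := by
      rw [htc1]
      simp only [List.length_singleton]
      omega
    obtain ⟨hRs, hRmono, hRsound, hRclosed⟩ :=
      loop_main a mn mx n (n * n) _ _ hinv0 hbound
    set R := bfsLoop a mn mx n (n * n) (vset (List.replicate n (List.replicate n false)) 0 0)
      [((0 : Int), (0 : Int))] with hR
    have hstartR : vget R 0 0 = true := hRmono 0 0 hv00
    have hAcomp : ∀ p : Int × Int, Reach a mn mx n p → inB n p ∧ vget R p.1 p.2 = true := by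
      intro p hp
      induction hp with
      | refl => exact ⟨hB0, hstartR⟩
      | tail hr hstep ih =>
        rename_i b c
        exact ⟨hstep.2.1, hRclosed b c ih.1 ih.2 hstep⟩
    have hBmain := satB_main a mn mx n hn1
    set S := satLoop a mn mx n (n * n) (PySem.Set.ofList [((0 : Int), (0 : Int))]) with hS
    have hdB : inB n ((n : Int) - 1, (n : Int) - 1) := ⟨by omega, by omega, by omega, by omega⟩
    -- rewrite A's visit[-1][-1] into vget R (n-1) (n-1)
    have hRlen : R.length = n := hRs.1
    have hRne : R ≠ [] := by
      intro h
      rw [h] at hRlen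
      simp at hRlen
      omega
    have hrow : PySem.List.pyGetD R (-1) ([] : List Bool) = R.getD (n - 1) [] := by
      rw [PySem.List.pyGetD_neg_one R ([] : List Bool) hRne, List.getLast_eq_getElem,
        List.getD_eq_getElem?_getD, List.getElem?_eq_getElem (by omega : n - 1 < R.length),
        Option.getD_some]
      congr 1
      omega
    obtain ⟨row, hrowdef⟩ : ∃ row, R.getD (n - 1) [] = row := ⟨_, rfl⟩
    have hrlen : row.length = n := by
      rw [← hrowdef]
      exact hRs.2 (n - 1) (by omega)
    have hrne : row ≠ [] := by
      intro h
      rw [h] at hrlen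
      simp at hrlen
      omega
    have hAcast : PySem.List.pyGetD (PySem.List.pyGetD R (-1) ([] : List Bool)) (-1) false
        = vget R ((n : Int) - 1) ((n : Int) - 1) := by
      rw [hrow, hrowdef]
      unfold vget
      have e1 : ((n : Int) - 1).toNat = n - 1 := by omega
      rw [e1, hrowdef]
      rw [PySem.List.pyGetD_neg_one row false hrne, List.getLast_eq_getElem]
      rw [List.getD_eq_getElem?_getD, List.getElem?_eq_getElem (by omega : n - 1 < row.length),
        Option.getD_some]
      congr 1
      omega
    rw [hAcast]
    have h1 : vget R ((n : Int) - 1) ((n : Int) - 1) = true ↔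
        Reach a mn mx n ((n : Int) - 1, (n : Int) - 1) :=
      ⟨fun h => hRsound _ hdB h, fun h => (hAcomp _ h).2⟩
    have h2 : PySem.Set.contains S ((n : Int) - 1, (n : Int) - 1) = true ↔
        Reach a mn mx n ((n : Int) - 1, (n : Int) - 1) :=
      (PySem.Set.contains_iff S _).trans (hBmain _ hdB)
    cases hA' : vget R ((n : Int) - 1) ((n : Int) - 1) with
    | true => exact (h2.mpr (h1.mp hA')).symm
    | false =>
      cases hB' : PySem.Set.contains S ((n : Int) - 1, (n : Int) - 1) with
      | false => rfl
      | true =>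
        rw [h1.mpr (h2.mp hB')] at hA'
        exact absurd hA' (by simp)
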